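-- pv_equiv track=rewrite | github.com/a637814143/-_tms | tools/split_for_compare_interactive.py | detect_label_col
-- ===== SOURCE A (Python) =====
-- def detect_label_col(cols):
--     candidates = [
--         "LabelBinary", "labelbinary",
--         "Label", "label",
--         "class", "Class",
--         "attack_cat", "Attack_cat",
--         "ground_truth", "GroundTruth", "Ground Truth",
--         " Label", " label"
--     ]
--     norm_map = {str(c).strip().lower(): c for c in cols}
--
--     for cand in candidates:
--         key = str(cand).strip().lower()
--         if key in norm_map:
--             return norm_map[key]
--
--     for c in cols:
--         if "label" in str(c).strip().lower():
--             return c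
--     return None
-- ===== SOURCE B (Python) =====
-- def detect_label_col(cols):
--     candidates = [
--         "LabelBinary", "labelbinary",
--         "Label", "label",
--         "class", "Class",
--         "attack_cat", "Attack_cat",
--         "ground_truth", "GroundTruth", "Ground Truth",
--         " Label", " label"
--     ]
--     # priority of each normalized candidate key = index of its first occurrence
--     prio = {}
--     for i, cand in enumerate(candidates):
--         key = str(cand).strip().lower()
--         if key not in prio:
--             prio[key] = i
--     best = None      # (priority, column) of the best candidate match so far
--     fallback = None  # first column whose normalized name contains "label"
--     for c in cols:
--         key = str(c).strip().lower()
--         p = prio.get(key)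
--         if p is not None and (best is None or p <= best[0]):
--             best = (p, c)
--         if fallback is None and "label" in key:
--             fallback = c
--     if best is not None:
--         return best[1]
--     return fallback
-- ===== Notes on version B (the rewrite author's own statement) =====
-- stated objective: alternative
-- what changed: B replaces A's dict over all columns plus a candidate scan and a separate fallback scan by a fixed candidate-key priority table and a single pass over the columns that tracks the best-priority (last-wins) match and the first 'label'-containing fallback.
import Mathlib
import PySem

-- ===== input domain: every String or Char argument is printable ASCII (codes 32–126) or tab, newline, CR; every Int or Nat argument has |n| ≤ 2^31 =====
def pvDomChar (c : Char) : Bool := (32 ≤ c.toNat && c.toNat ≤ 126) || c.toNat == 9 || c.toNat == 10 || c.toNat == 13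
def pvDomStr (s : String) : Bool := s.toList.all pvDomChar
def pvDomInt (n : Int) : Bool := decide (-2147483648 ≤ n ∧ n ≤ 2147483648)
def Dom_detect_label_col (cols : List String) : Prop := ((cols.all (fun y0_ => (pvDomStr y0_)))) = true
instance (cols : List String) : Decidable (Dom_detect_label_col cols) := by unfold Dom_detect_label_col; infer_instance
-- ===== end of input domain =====

-- B replaces A's dict of all columns plus two extra scans by a fixed candidate-priority
-- table and a single pass over the columns (alternative decomposition, same result).


-- str(c).strip().lower() (shared literal helper of both Pythons)
def pvNorm (s : String) : String := PySem.Str.lower (PySem.Str.strip s)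

-- the candidate list, identical literal in both Pythons
def pvCandidates : List String :=
  ["LabelBinary", "labelbinary",
   "Label", "label",
   "class", "Class",
   "attack_cat", "Attack_cat",
   "ground_truth", "GroundTruth", "Ground Truth",
   " Label", " label"]

-- ===== PORT A =====
def detect_label_col (cols : List String) : Option String :=
  let normMap : PySem.Dict String String :=
    cols.foldl (fun d c => d.insert (pvNorm c) c) PySem.Dict.empty
  match pvCandidates.findSome? (fun cand => normMap.get? (pvNorm cand)) with
  | some v => some v
  | none => cols.find? (fun c => PySem.Str.isIn "label" (pvNorm c))

-- ===== PORT B =====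
-- one step of the prio-building loop: `if key not in prio: prio[key] = i`
def pvPrioStep (d : PySem.Dict String Int) (p : Int × String) : PySem.Dict String Int :=
  if d.contains (pvNorm p.2) then d else d.insert (pvNorm p.2) p.1

-- prio: first-occurrence index of each normalized candidate key
def pvPrio : PySem.Dict String Int :=
  (PySem.List.enumerate pvCandidates).foldl pvPrioStep PySem.Dict.empty

-- the best-match update of B's loop body (`if p is not None and (best is None or p <= best[0])`)
def pvG (b : Option (Int × String)) (c : String) : Option (Int × String) :=
  match pvPrio.get? (pvNorm c) with
  | some p =>
    match b with
    | none => some (p, c)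
    | some (bp, bc) => if p ≤ bp then some (p, c) else some (bp, bc)
  | none => b

-- the fallback update of B's loop body (`if fallback is None and "label" in key`)
def pvH (fb : Option String) (c : String) : Option String :=
  match fb with
  | some f => some f
  | none => if PySem.Str.isIn "label" (pvNorm c) then some c else none

-- the single-pass state update of B's loop body: both assignments at once
def pvStep (st : Option (Int × String) × Option String) (c : String) :
    Option (Int × String) × Option String :=
  (pvG st.1 c, pvH st.2 c)

def detect_label_col_alt (cols : List String) : Option String :=
  let st := cols.foldl pvStep (none, none)
  match st.1 with
  | some (_, c) => some c
  | none => st.2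

-- ===== PRECONDITION & SPEC =====
def Spec_detect_label_col (cols : List String) (out : Option String) : Prop := out = detect_label_col_alt cols
instance (cols : List String) (out : Option String) : Decidable (Spec_detect_label_col cols out) := by unfold Spec_detect_label_col; infer_instance

-- ===== CLAIM (what is proved, stated in full; the proofs are below) =====
def Claim_equal_detect_label_col : Prop := ∀ (cols : List String), Dom_detect_label_col cols → Spec_detect_label_col cols (detect_label_col cols)



-- ===== LEMMAS AND PROOFS =====

-- lookup in A's normalized map
def pvLookup (cols : List String) (k : String) : Option String :=
  (cols.foldl (fun d c => d.insert (pvNorm c) c) PySem.Dict.empty).get? k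

lemma pvStep_eq (st : Option (Int × String) × Option String) (c : String) :
    pvStep st c = (pvG st.1 c, pvH st.2 c) := rfl

lemma pvStep_prod (l : List String) (a : Option (Int × String)) (b : Option String) :
    l.foldl pvStep (a, b) = (l.foldl pvG a, l.foldl pvH b) := by
  induction l generalizing a b with
  | nil => rfl
  | cons c l ih => simp only [List.foldl_cons, pvStep_eq, ih]

lemma pvH_foldl_some (l : List String) (x : String) : l.foldl pvH (some x) = some x := by
  induction l with
  | nil => rfl
  | cons c l ih => simpa [pvH] using ih

lemma pvH_foldl_none (l : List String) :
    l.foldl pvH none = l.find? (fun c => PySem.Str.isIn "label" (pvNorm c)) := by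
  induction l with
  | nil => rfl
  | cons c l ih =>
      simp only [List.foldl_cons, List.find?, pvH]
      cases hc : PySem.Str.isIn "label" (pvNorm c) with
      | false => simpa [hc] using ih
      | true => simp [pvH_foldl_some]

lemma pvLookup_nil (k : String) : pvLookup [] k = none := rfl

lemma pvLookup_append (l : List String) (c : String) (k : String) :
    pvLookup (l ++ [c]) k = if k = pvNorm c then some c else pvLookup l k := by
  simp only [pvLookup, List.foldl_append, List.foldl_cons, List.foldl_nil]
  exact PySem.Dict.get?_insert _ _ _ _

lemma pvEnum_eq : PySem.List.enumerate pvCandidates =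
    [(0, "LabelBinary"), (1, "labelbinary"), (2, "Label"), (3, "label"), (4, "class"),
     (5, "Class"), (6, "attack_cat"), (7, "Attack_cat"), (8, "ground_truth"),
     (9, "GroundTruth"), (10, "Ground Truth"), (11, " Label"), (12, " label")] := by decide

lemma pvS1 : pvPrioStep (PySem.Dict.empty) (0, "LabelBinary") = PySem.Dict.mk [("labelbinary", 0)] := by decide
lemma pvS2 : pvPrioStep (PySem.Dict.mk [("labelbinary", 0)]) (1, "labelbinary") = PySem.Dict.mk [("labelbinary", 0)] := by decide
lemma pvS3 : pvPrioStep (PySem.Dict.mk [("labelbinary", 0)]) (2, "Label") = PySem.Dict.mk [("labelbinary", 0), ("label", 2)] := by decide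
lemma pvS4 : pvPrioStep (PySem.Dict.mk [("labelbinary", 0), ("label", 2)]) (3, "label") = PySem.Dict.mk [("labelbinary", 0), ("label", 2)] := by decide
lemma pvS5 : pvPrioStep (PySem.Dict.mk [("labelbinary", 0), ("label", 2)]) (4, "class") = PySem.Dict.mk [("labelbinary", 0), ("label", 2), ("class", 4)] := by decide
lemma pvS6 : pvPrioStep (PySem.Dict.mk [("labelbinary", 0), ("label", 2), ("class", 4)]) (5, "Class") = PySem.Dict.mk [("labelbinary", 0), ("label", 2), ("class", 4)] := by decide
lemma pvS7 : pvPrioStep (PySem.Dict.mk [("labelbinary", 0), ("label", 2), ("class", 4)]) (6, "attack_cat") = PySem.Dict.mk [("labelbinary", 0), ("label", 2), ("class", 4), ("attack_cat", 6)] := by decide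
lemma pvS8 : pvPrioStep (PySem.Dict.mk [("labelbinary", 0), ("label", 2), ("class", 4), ("attack_cat", 6)]) (7, "Attack_cat") = PySem.Dict.mk [("labelbinary", 0), ("label", 2), ("class", 4), ("attack_cat", 6)] := by decide
lemma pvS9 : pvPrioStep (PySem.Dict.mk [("labelbinary", 0), ("label", 2), ("class", 4), ("attack_cat", 6)]) (8, "ground_truth") = PySem.Dict.mk [("labelbinary", 0), ("label", 2), ("class", 4), ("attack_cat", 6), ("ground_truth", 8)] := by decide
lemma pvS10 : pvPrioStep (PySem.Dict.mk [("labelbinary", 0), ("label", 2), ("class", 4), ("attack_cat", 6), ("ground_truth", 8)]) (9, "GroundTruth") = PySem.Dict.mk [("labelbinary", 0), ("label", 2), ("class", 4), ("attack_cat", 6), ("ground_truth", 8), ("groundtruth", 9)] := by decide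
lemma pvS11 : pvPrioStep (PySem.Dict.mk [("labelbinary", 0), ("label", 2), ("class", 4), ("attack_cat", 6), ("ground_truth", 8), ("groundtruth", 9)]) (10, "Ground Truth") = PySem.Dict.mk [("labelbinary", 0), ("label", 2), ("class", 4), ("attack_cat", 6), ("ground_truth", 8), ("groundtruth", 9), ("ground truth", 10)] := by decide
lemma pvS12 : pvPrioStep (PySem.Dict.mk [("labelbinary", 0), ("label", 2), ("class", 4), ("attack_cat", 6), ("ground_truth", 8), ("groundtruth", 9), ("ground truth", 10)]) (11, " Label") = PySem.Dict.mk [("labelbinary", 0), ("label", 2), ("class", 4), ("attack_cat", 6), ("ground_truth", 8), ("groundtruth", 9), ("ground truth", 10)] := by decide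
lemma pvS13 : pvPrioStep (PySem.Dict.mk [("labelbinary", 0), ("label", 2), ("class", 4), ("attack_cat", 6), ("ground_truth", 8), ("groundtruth", 9), ("ground truth", 10)]) (12, " label") = PySem.Dict.mk [("labelbinary", 0), ("label", 2), ("class", 4), ("attack_cat", 6), ("ground_truth", 8), ("groundtruth", 9), ("ground truth", 10)] := by decide

lemma pvPrio_eq : pvPrio = PySem.Dict.mk
    [("labelbinary", 0), ("label", 2), ("class", 4), ("attack_cat", 6),
     ("ground_truth", 8), ("groundtruth", 9), ("ground truth", 10)] := by
  rw [pvPrio, pvEnum_eq]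
  simp only [List.foldl_cons, List.foldl_nil, pvS1, pvS2, pvS3, pvS4, pvS5, pvS6, pvS7,
    pvS8, pvS9, pvS10, pvS11, pvS12, pvS13]

-- equation lemmas for pvG that never force evaluation of pvPrio
lemma pvG_none {c : String} (h : pvPrio.get? (pvNorm c) = none) (b : Option (Int × String)) :
    pvG b c = b := by unfold pvG; rw [h]

lemma pvG_some_none {c : String} {p : Int} (h : pvPrio.get? (pvNorm c) = some p) :
    pvG none c = some (p, c) := by unfold pvG; rw [h]

lemma pvG_some_some {c : String} {p : Int} (h : pvPrio.get? (pvNorm c) = some p)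
    (bp : Int) (bc : String) :
    pvG (some (bp, bc)) c = if p ≤ bp then some (p, c) else some (bp, bc) := by
  unfold pvG; rw [h]

lemma pvPrio_get?_eq {k : String} {p : Int} (h : pvPrio.get? k = some p) :
    (k = "labelbinary" ∧ p = 0) ∨ (k = "label" ∧ p = 2) ∨ (k = "class" ∧ p = 4) ∨
    (k = "attack_cat" ∧ p = 6) ∨ (k = "ground_truth" ∧ p = 8) ∨
    (k = "groundtruth" ∧ p = 9) ∨ (k = "ground truth" ∧ p = 10) := by
  rw [pvPrio_eq] at h
  simp only [PySem.Dict.get?_mk_cons, beq_iff_eq] at h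
  split_ifs at h with h1 h2 h3 h4 h5 h6 h7
  · exact Or.inl ⟨h1.symm, (Option.some.inj h).symm⟩
  · exact Or.inr (Or.inl ⟨h2.symm, (Option.some.inj h).symm⟩)
  · exact Or.inr (Or.inr (Or.inl ⟨h3.symm, (Option.some.inj h).symm⟩))
  · exact Or.inr (Or.inr (Or.inr (Or.inl ⟨h4.symm, (Option.some.inj h).symm⟩)))
  · exact Or.inr (Or.inr (Or.inr (Or.inr (Or.inl ⟨h5.symm, (Option.some.inj h).symm⟩))))
  · exact Or.inr (Or.inr (Or.inr (Or.inr (Or.inr (Or.inl ⟨h6.symm, (Option.some.inj h).symm⟩)))))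
  · exact Or.inr (Or.inr (Or.inr (Or.inr (Or.inr (Or.inr ⟨h7.symm, (Option.some.inj h).symm⟩)))))
  · exact absurd h (by simp [PySem.Dict.get?])

-- the loop invariant of B's best-candidate accumulator, against A's map
def pvInv (cols : List String) : Prop :=
  match cols.foldl pvG none with
  | none => ∀ k p, pvPrio.get? k = some p → pvLookup cols k = none
  | some (p, c) =>
      pvPrio.get? (pvNorm c) = some p ∧ pvLookup cols (pvNorm c) = some c ∧
      ∀ k q, pvPrio.get? k = some q → q < p → pvLookup cols k = none

lemma pvInv_holds (cols : List String) : pvInv cols := by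
  induction cols using List.reverseRecOn with
  | nil =>
      simp only [pvInv, List.foldl_nil]
      intro k p _
      exact pvLookup_nil k
  | append_singleton l c ih =>
      have hfold : (l ++ [c]).foldl pvG none = pvG (l.foldl pvG none) c := by
        simp [List.foldl_append]
      rcases hb : l.foldl pvG none with _ | ⟨bp, bc⟩
      · -- previously no best
        simp only [pvInv, hb] at ih
        rcases hp : pvPrio.get? (pvNorm c) with _ | p
        · simp only [pvInv, hfold, hb, pvG_none hp]
          intro k q hk
          rw [pvLookup_append]
          have : k ≠ pvNorm c := by
            intro he; rw [he, hp] at hk; simp at hk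
          rw [if_neg this]
          exact ih k q hk
        · simp only [pvInv, hfold, hb, pvG_some_none hp]
          refine ⟨hp, ?_, ?_⟩
          · rw [pvLookup_append, if_pos rfl]
          · intro k q hk hq
            rw [pvLookup_append]
            have : k ≠ pvNorm c := by
              intro he; rw [he, hp] at hk
              exact absurd (Option.some.inj hk) (by omega)
            rw [if_neg this]
            exact ih k q hk
      · -- previous best (bp, bc)
        simp only [pvInv, hb] at ih
        obtain ⟨hbp, hbl, hbmin⟩ := ih
        rcases hp : pvPrio.get? (pvNorm c) with _ | p
        · -- c's key is not a candidate key: best unchanged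
          simp only [pvInv, hfold, hb, pvG_none hp]
          have hne : pvNorm bc ≠ pvNorm c := by
            intro he; rw [← he, hbp] at hp; simp at hp
          refine ⟨hbp, ?_, ?_⟩
          · rw [pvLookup_append, if_neg hne]; exact hbl
          · intro k q hk hq
            rw [pvLookup_append]
            have : k ≠ pvNorm c := by
              intro he; rw [he, hp] at hk; simp at hk
            rw [if_neg this]
            exact hbmin k q hk hq
        · by_cases hle : p ≤ bp
          · -- new best (p, c)
            simp only [pvInv, hfold, hb, pvG_some_some hp, if_pos hle]
            refine ⟨hp, ?_, ?_⟩
            · rw [pvLookup_append, if_pos rfl]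
            · intro k q hk hq
              rw [pvLookup_append]
              have : k ≠ pvNorm c := by
                intro he; rw [he, hp] at hk
                exact absurd (Option.some.inj hk) (by omega)
              rw [if_neg this]
              exact hbmin k q hk (by omega)
          · -- keep (bp, bc)
            simp only [pvInv, hfold, hb, pvG_some_some hp, if_neg hle]
            have hne : pvNorm bc ≠ pvNorm c := by
              intro he
              rw [← he, hbp] at hp
              have : bp = p := Option.some.inj hp
              omega
            refine ⟨hbp, ?_, ?_⟩
            · rw [pvLookup_append, if_neg hne]; exact hbl
            · intro k q hk hq
              rw [pvLookup_append]
              have : k ≠ pvNorm c := by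
                intro he; rw [he, hp] at hk
                have : q = p := (Option.some.inj hk).symm
                omega
              rw [if_neg this]
              exact hbmin k q hk hq

-- normalized forms of the candidate literals
lemma pvN1 : pvNorm "LabelBinary" = "labelbinary" := by decide
lemma pvN2 : pvNorm "labelbinary" = "labelbinary" := by decide
lemma pvN3 : pvNorm "Label" = "label" := by decide
lemma pvN4 : pvNorm "label" = "label" := by decide
lemma pvN5 : pvNorm "class" = "class" := by decide
lemma pvN6 : pvNorm "Class" = "class" := by decide
lemma pvN7 : pvNorm "attack_cat" = "attack_cat" := by decide
lemma pvN8 : pvNorm "Attack_cat" = "attack_cat" := by decide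
lemma pvN9 : pvNorm "ground_truth" = "ground_truth" := by decide
lemma pvN10 : pvNorm "GroundTruth" = "groundtruth" := by decide
lemma pvN11 : pvNorm "Ground Truth" = "ground truth" := by decide
lemma pvN12 : pvNorm " Label" = "label" := by decide
lemma pvN13 : pvNorm " label" = "label" := by decide

lemma pvFindSome_eq (cols : List String) :
    pvCandidates.findSome? (fun cand => pvLookup cols (pvNorm cand)) =
      (cols.foldl pvG none).map (fun pc => pc.2) := by
  have hinv := pvInv_holds cols
  rcases hb : cols.foldl pvG none with _ | ⟨p, c⟩
  · simp only [pvInv, hb] at hinv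
    have l1 : pvLookup cols "labelbinary" = none := hinv _ 0 (by rw [pvPrio_eq]; rfl)
    have l2 : pvLookup cols "label" = none := hinv _ 2 (by rw [pvPrio_eq]; rfl)
    have l3 : pvLookup cols "class" = none := hinv _ 4 (by rw [pvPrio_eq]; rfl)
    have l4 : pvLookup cols "attack_cat" = none := hinv _ 6 (by rw [pvPrio_eq]; rfl)
    have l5 : pvLookup cols "ground_truth" = none := hinv _ 8 (by rw [pvPrio_eq]; rfl)
    have l6 : pvLookup cols "groundtruth" = none := hinv _ 9 (by rw [pvPrio_eq]; rfl)
    have l7 : pvLookup cols "ground truth" = none := hinv _ 10 (by rw [pvPrio_eq]; rfl)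
    simp [pvCandidates, pvN1, pvN2, pvN3, pvN4, pvN5, pvN6, pvN7,
      pvN8, pvN9, pvN10, pvN11, pvN12, pvN13, l1, l2, l3, l4, l5, l6, l7]
  · simp only [pvInv, hb] at hinv
    obtain ⟨hp, hl, hmin⟩ := hinv
    have m1 : pvPrio.get? "labelbinary" = some 0 := by rw [pvPrio_eq]; rfl
    have m2 : pvPrio.get? "label" = some 2 := by rw [pvPrio_eq]; rfl
    have m3 : pvPrio.get? "class" = some 4 := by rw [pvPrio_eq]; rfl
    have m4 : pvPrio.get? "attack_cat" = some 6 := by rw [pvPrio_eq]; rfl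
    have m5 : pvPrio.get? "ground_truth" = some 8 := by rw [pvPrio_eq]; rfl
    have m6 : pvPrio.get? "groundtruth" = some 9 := by rw [pvPrio_eq]; rfl
    rcases pvPrio_get?_eq hp with ⟨hk, hq⟩ | ⟨hk, hq⟩ | ⟨hk, hq⟩ | ⟨hk, hq⟩ |
      ⟨hk, hq⟩ | ⟨hk, hq⟩ | ⟨hk, hq⟩ <;> subst hq <;> rw [hk] at hl
    · simp [pvCandidates, pvN1, hl]
    · simp [pvCandidates, pvN1, pvN2, pvN3, hl, hmin "labelbinary" 0 m1 (by omega)]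
    · simp [pvCandidates, pvN1, pvN2, pvN3, pvN4, pvN5, hl,
        hmin "labelbinary" 0 m1 (by omega), hmin "label" 2 m2 (by omega)]
    · simp [pvCandidates, pvN1, pvN2, pvN3, pvN4, pvN5, pvN6, pvN7, hl,
        hmin "labelbinary" 0 m1 (by omega), hmin "label" 2 m2 (by omega),
        hmin "class" 4 m3 (by omega)]
    · simp [pvCandidates, pvN1, pvN2, pvN3, pvN4, pvN5, pvN6, pvN7, pvN8, pvN9, hl,
        hmin "labelbinary" 0 m1 (by omega), hmin "label" 2 m2 (by omega),
        hmin "class" 4 m3 (by omega), hmin "attack_cat" 6 m4 (by omega)]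
    · simp [pvCandidates, pvN1, pvN2, pvN3, pvN4, pvN5, pvN6, pvN7, pvN8, pvN9, pvN10, hl,
        hmin "labelbinary" 0 m1 (by omega), hmin "label" 2 m2 (by omega),
        hmin "class" 4 m3 (by omega), hmin "attack_cat" 6 m4 (by omega),
        hmin "ground_truth" 8 m5 (by omega)]
    · simp [pvCandidates, pvN1, pvN2, pvN3, pvN4, pvN5, pvN6, pvN7, pvN8, pvN9, pvN10,
        pvN11, hl,
        hmin "labelbinary" 0 m1 (by omega), hmin "label" 2 m2 (by omega),
        hmin "class" 4 m3 (by omega), hmin "attack_cat" 6 m4 (by omega),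
        hmin "ground_truth" 8 m5 (by omega), hmin "groundtruth" 9 m6 (by omega)]

-- ===== VERDICT (by name: the statement is the Claim_ definition above) =====
theorem detect_label_col_spec : Claim_equal_detect_label_col := by
  intro cols _
  unfold Spec_detect_label_col detect_label_col detect_label_col_alt
  have hF2 : pvCandidates.findSome? (fun cand =>
      (cols.foldl (fun d c => d.insert (pvNorm c) c) PySem.Dict.empty).get? (pvNorm cand)) =
      (cols.foldl pvG none).map (fun pc => pc.2) := pvFindSome_eq cols
  simp only [pvStep_prod, hF2]
  rcases hb : cols.foldl pvG none with _ | ⟨p, c⟩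
  · simp [pvH_foldl_none]
  · simp
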